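-- pv_equiv track=rewrite | github.com/GermanBuidin/SportManager | SportManager/sport_items/analitica/utils.py | sort_skus
-- ===== SOURCE A (Python) =====
-- def sort_skus(data: dict):
--     sort_sku = {}
--     for shop in data:
--         for sku in data[shop]:
--             if sku in sort_sku:
--                 sort_sku[sku][shop] = data[shop][sku]
--             else:
--                 sort_sku[sku] = {shop: data[shop][sku]}
--     return sort_sku
-- ===== SOURCE B (Python) =====
-- def sort_skus(data: dict):
--     skus = dict.fromkeys(sku for items in data.values() for sku in items)
--     return {
--         sku: {shop: items[sku] for shop, items in data.items() if sku in items}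
--         for sku in skus
--     }
-- ===== Notes on version B (the rewrite author's own statement) =====
-- stated objective: simpler
-- what changed: A builds the transposed dict with a single nested indexing pass that inserts or updates as it goes; B first collects the deduplicated SKU list in one pass and then builds each inner dict by a comprehension re-scanning the shops, at the cost of one extra scan per SKU. Pre_ only excludes association lists with duplicate outer or inner keys, which do not represent Python dicts.
import Mathlib
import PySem

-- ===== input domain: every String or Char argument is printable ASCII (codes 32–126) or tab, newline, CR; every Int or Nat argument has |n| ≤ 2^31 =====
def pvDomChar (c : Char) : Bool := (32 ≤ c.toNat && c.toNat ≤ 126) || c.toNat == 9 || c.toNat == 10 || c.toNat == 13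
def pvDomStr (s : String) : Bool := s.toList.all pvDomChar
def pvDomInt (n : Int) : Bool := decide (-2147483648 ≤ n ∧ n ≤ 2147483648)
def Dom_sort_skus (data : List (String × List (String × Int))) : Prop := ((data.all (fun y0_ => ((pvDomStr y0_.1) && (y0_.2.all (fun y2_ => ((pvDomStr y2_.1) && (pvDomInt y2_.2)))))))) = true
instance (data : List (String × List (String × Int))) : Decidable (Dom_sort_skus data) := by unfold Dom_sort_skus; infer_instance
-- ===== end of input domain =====

-- B transposes by first dedup-collecting the SKUs and then building each inner dict with one
-- comprehension over the shops (objective: simpler); A indexes-as-it-goes in a single nested pass.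

-- ===== PORT A =====
-- A's dicts are PySem.Dict; 'data[shop][sku]' inside 'for sku in data[shop]' is the pair's own
-- value (exact because Pre_ demands unique keys, as a Python dict has).
def sort_skus (data : List (String × List (String × Int))) : List (String × List (String × Int)) :=
  let sort_sku : PySem.Dict String (PySem.Dict String Int) :=
    data.foldl (fun acc p =>
      p.2.foldl (fun acc q =>
        if acc.contains q.1 then
          acc.modify q.1 PySem.Dict.empty (fun inner => inner.insert p.1 q.2)
        else
          acc.insert q.1 (PySem.Dict.ofList [(p.1, q.2)])) acc) PySem.Dict.empty
  sort_sku.items.map (fun e => (e.1, e.2.items))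

-- ===== PORT B =====
def sort_skus_alt (data : List (String × List (String × Int))) : List (String × List (String × Int)) :=
  let skus : List String := PySem.List.dedup (data.flatMap (fun p => p.2.map (fun q => q.1)))
  skus.map (fun sku =>
    (sku, (data.filter (fun p => (PySem.Dict.mk p.2).contains sku)).map
            (fun p => (p.1, ((PySem.Dict.mk p.2).get? sku).getD 0))))

-- ===== PRECONDITION & SPEC =====
-- Pre_ excludes only association lists with duplicate outer or inner keys: those do not
-- represent Python dicts (A's parameter is a dict, whose keys are necessarily unique).
def Pre_sort_skus (data : List (String × List (String × Int))) : Prop :=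
  (data.map Prod.fst).Nodup ∧ ∀ p ∈ data, (p.2.map Prod.fst).Nodup
instance (data : List (String × List (String × Int))) : Decidable (Pre_sort_skus data) := by
  unfold Pre_sort_skus; infer_instance
def pvWitness_sort_skus : (List (String × List (String × Int))) :=
  [("a", [("x", 1), ("y", 2)]), ("b", [("x", 3)])]
def Spec_sort_skus (data : List (String × List (String × Int))) (out : List (String × List (String × Int))) : Prop := out = sort_skus_alt data
instance (data : List (String × List (String × Int))) (out : List (String × List (String × Int))) : Decidable (Spec_sort_skus data out) := by unfold Spec_sort_skus; infer_instance

-- ===== CLAIM (what is proved, stated in full; the proofs are below) =====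
def Claim_equal_sort_skus : Prop := ∀ (data : List (String × List (String × Int))), Dom_sort_skus data → Pre_sort_skus data → Spec_sort_skus data (sort_skus data)

-- ===== LEMMAS AND PROOFS =====

-- inner-dict column of the transposed result for one sku (B's inner comprehension)
def colA (data : List (String × List (String × Int))) (sku : String) : List (String × Int) :=
  (data.filter (fun p => (PySem.Dict.mk p.2).contains sku)).map
    (fun p => (p.1, ((PySem.Dict.mk p.2).get? sku).getD 0))

def trD (data : List (String × List (String × Int))) : PySem.Dict String (PySem.Dict String Int) :=
  PySem.Dict.mk ((PySem.Set.ofList (data.flatMap (fun p => p.2.map (fun q => q.1)))).map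
    (fun sku => (sku, PySem.Dict.mk (colA data sku))))


-- A's accumulator after a full pass, characterised as the transpose
lemma trD_keys (ds : List (String × List (String × Int))) :
    (trD ds).keys = PySem.Set.ofList (ds.flatMap (fun p => p.2.map (fun q => q.1))) := by
  simp [trD, PySem.Dict.keys, List.map_map, Function.comp_def]

lemma colA_eq_nil (ds : List (String × List (String × Int))) (sku : String)
    (h : sku ∉ ds.flatMap (fun p => p.2.map (fun q => q.1))) : colA ds sku = [] := by
  unfold colA
  rw [List.filter_eq_nil_iff.mpr, List.map_nil]
  intro p hp hc
  simp only [PySem.Dict.contains, List.any_eq_true] at hc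
  obtain ⟨x, hx, hbeq⟩ := hc
  exact h (List.mem_flatMap.mpr ⟨p, hp, List.mem_map.mpr ⟨x, hx, eq_of_beq hbeq⟩⟩)

lemma colA_append_singleton (ds : List (String × List (String × Int)))
    (p : String × List (String × Int)) (sku : String) :
    colA (ds ++ [p]) sku = colA ds sku ++
      (if (PySem.Dict.mk p.2).contains sku then
        [(p.1, ((PySem.Dict.mk p.2).get? sku).getD 0)] else []) := by
  unfold colA
  rw [List.filter_append, List.map_append]
  congr 1
  rw [List.filter_singleton]
  by_cases hc : (PySem.Dict.mk p.2).contains sku = true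
  · simp [hc]
  · simp [Bool.eq_false_iff.mpr hc]

lemma inner_fold_items (s : String) :
    ∀ (l : List (String × Int)) (acc : PySem.Dict String (PySem.Dict String Int)),
    (l.map Prod.fst).Nodup → acc.keys.Nodup →
    (∀ q ∈ l, ∀ inner, acc.get? q.1 = some inner → inner.contains s = false) →
    (l.foldl (fun acc q =>
        if acc.contains q.1 then
          acc.modify q.1 PySem.Dict.empty (fun inner => inner.insert s q.2)
        else
          acc.insert q.1 (PySem.Dict.ofList [(s, q.2)])) acc)
    = PySem.Dict.mk
        (acc.items.map (fun e =>
            if (PySem.Dict.mk l).contains e.1 then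
              (e.1, PySem.Dict.mk (e.2.items ++ [(s, ((PySem.Dict.mk l).get? e.1).getD 0)]))
            else e)
          ++ (l.filter (fun q => !acc.contains q.1)).map
              (fun q => (q.1, PySem.Dict.ofList [(s, q.2)]))) := by
  intro l
  induction l with
  | nil =>
    intro acc _ _ _
    simp [PySem.Dict.contains]
  | cons q rest ih =>
    intro acc hnd hk hfresh
    rw [List.map_cons] at hnd
    have hq1 : q.1 ∉ rest.map Prod.fst := (List.nodup_cons.mp hnd).1
    have hndr : (rest.map Prod.fst).Nodup := (List.nodup_cons.mp hnd).2
    rw [List.foldl_cons]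
    by_cases h : acc.contains q.1 = true
    · rw [if_pos h]
      have hmod : acc.modify q.1 PySem.Dict.empty (fun inner => inner.insert s q.2)
          = acc.insert q.1 ((acc.getD q.1 PySem.Dict.empty).insert s q.2) := rfl
      rw [hmod]
      rw [ih _ hndr (by rw [PySem.Dict.keys_insert_of_contains _ _ h]; exact hk)
        (by
          intro q' hq' inner hget
          have hne : q'.1 ≠ q.1 := fun hEq => hq1 (hEq ▸ List.mem_map_of_mem hq')
          rw [PySem.Dict.get?_insert_of_ne _ _ hne] at hget
          exact hfresh q' (List.mem_cons_of_mem _ hq') inner hget)]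
      congr 1
      have hmap : ((acc.insert q.1 ((acc.getD q.1 PySem.Dict.empty).insert s q.2)).items.map
          (fun e => if (PySem.Dict.mk rest).contains e.1 then
              (e.1, PySem.Dict.mk (e.2.items ++ [(s, ((PySem.Dict.mk rest).get? e.1).getD 0)]))
            else e))
          = acc.items.map (fun e => if (PySem.Dict.mk (q :: rest)).contains e.1 then
              (e.1, PySem.Dict.mk (e.2.items ++ [(s, ((PySem.Dict.mk (q :: rest)).get? e.1).getD 0)]))
            else e) := by
        rw [PySem.Dict.items_insert_of_contains _ _ h, List.map_map]
        apply List.map_congr_left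
        intro e he
        by_cases heq : e.1 = q.1
        · have hget : acc.get? q.1 = some e.2 := by
            rw [← heq]; exact PySem.Dict.get?_of_mem_items _ he hk
          have hgetD : acc.getD q.1 PySem.Dict.empty = e.2 := by
            rw [← heq]; exact PySem.Dict.getD_of_mem_items _ he hk _
          have hfr : e.2.contains s = false := hfresh q (List.mem_cons_self) e.2 (heq ▸ hget)
          have hrest : (PySem.Dict.mk rest).contains q.1 = false := by
            simp only [PySem.Dict.contains, List.any_eq_false]
            intro p hp
            exact fun hEq => hq1 (eq_of_beq hEq ▸ List.mem_map_of_mem hp)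
          simp only [Function.comp_apply, heq, beq_self_eq_true, if_pos]
          rw [hrest]
          simp only [Bool.false_eq_true, if_false]
          have hcons : (PySem.Dict.mk (q :: rest)).contains q.1 = true := by
            simp [PySem.Dict.contains]
          rw [hcons, if_pos rfl]
          have : (PySem.Dict.mk (q :: rest)).get? q.1 = some q.2 := by
            simp [PySem.Dict.get?]
          rw [this]
          refine Prod.ext rfl ?_
          apply PySem.Dict.ext
          rw [hgetD, PySem.Dict.items_insert_of_not_contains _ _ hfr]
          simp
        · have hne : (e.1 == q.1) = false := beq_eq_false_iff_ne.mpr heq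
          have hc : (PySem.Dict.mk (q :: rest)).contains e.1 = (PySem.Dict.mk rest).contains e.1 := by
            simp [PySem.Dict.contains, show (q.1 == e.1) = false from beq_eq_false_iff_ne.mpr (Ne.symm heq)]
          have hg : (PySem.Dict.mk (q :: rest)).get? e.1 = (PySem.Dict.mk rest).get? e.1 := by
            simp [PySem.Dict.get?, List.find?, show (q.1 == e.1) = false from beq_eq_false_iff_ne.mpr (Ne.symm heq)]
          simp only [Function.comp_apply, hne, Bool.false_eq_true, if_false, hc, hg]
      have hfil : (rest.filter (fun x => !(acc.insert q.1 ((acc.getD q.1 PySem.Dict.empty).insert s q.2)).contains x.1))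
          = (q :: rest).filter (fun x => !acc.contains x.1) := by
        rw [List.filter_cons_of_neg (by simp [h])]
        apply List.filter_congr
        intro x hx
        have hne : (x.1 == q.1) = false :=
          beq_eq_false_iff_ne.mpr (fun hEq => hq1 (hEq ▸ List.mem_map_of_mem hx))
        rw [PySem.Dict.contains_insert, hne, Bool.false_or]
      rw [hmap, hfil]
    · rw [if_neg h]
      have hF : acc.contains q.1 = false := Bool.eq_false_iff.mpr h
      have hnk : q.1 ∉ acc.keys := fun hm =>
        h ((PySem.Dict.contains_iff_mem_keys _ _).mpr hm)
      rw [ih _ hndr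
        (by
          rw [PySem.Dict.keys_insert_of_not_contains _ _ hF]
          simpa [List.nodup_append] using ⟨hk, fun x hx hEq => hnk (hEq ▸ hx)⟩)
        (by
          intro q' hq' inner hget
          have hne : q'.1 ≠ q.1 := fun hEq => hq1 (hEq ▸ List.mem_map_of_mem hq')
          rw [PySem.Dict.get?_insert_of_ne _ _ hne] at hget
          exact hfresh q' (List.mem_cons_of_mem _ hq') inner hget)]
      congr 1
      rw [PySem.Dict.items_insert_of_not_contains _ _ hF, List.map_append]
      have hrest : (PySem.Dict.mk rest).contains q.1 = false := by
        simp only [PySem.Dict.contains, List.any_eq_false]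
        intro p hp
        exact fun hEq => hq1 (eq_of_beq hEq ▸ List.mem_map_of_mem hp)
      have hsingle : ([((q.1 : String), PySem.Dict.ofList [(s, q.2)])].map
          (fun e => if (PySem.Dict.mk rest).contains e.1 then
              (e.1, PySem.Dict.mk (e.2.items ++ [(s, ((PySem.Dict.mk rest).get? e.1).getD 0)]))
            else e))
          = [(q.1, PySem.Dict.ofList [(s, q.2)])] := by
        rw [List.map_singleton, if_neg (by simp [hrest])]
      rw [hsingle]
      have hmap : (acc.items.map
          (fun e => if (PySem.Dict.mk rest).contains e.1 then
              (e.1, PySem.Dict.mk (e.2.items ++ [(s, ((PySem.Dict.mk rest).get? e.1).getD 0)]))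
            else e))
          = acc.items.map (fun e => if (PySem.Dict.mk (q :: rest)).contains e.1 then
              (e.1, PySem.Dict.mk (e.2.items ++ [(s, ((PySem.Dict.mk (q :: rest)).get? e.1).getD 0)]))
            else e) := by
        apply List.map_congr_left
        intro e he
        have heq : e.1 ≠ q.1 := by
          intro hEq
          exact hnk (hEq ▸ List.mem_map_of_mem he)
        have hc : (PySem.Dict.mk (q :: rest)).contains e.1 = (PySem.Dict.mk rest).contains e.1 := by
          simp [PySem.Dict.contains, show (q.1 == e.1) = false from beq_eq_false_iff_ne.mpr (Ne.symm heq)]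
        have hg : (PySem.Dict.mk (q :: rest)).get? e.1 = (PySem.Dict.mk rest).get? e.1 := by
          simp [PySem.Dict.get?, List.find?, show (q.1 == e.1) = false from beq_eq_false_iff_ne.mpr (Ne.symm heq)]
        simp only [hc, hg]
      have hfil : (rest.filter (fun x => !(acc.insert q.1 (PySem.Dict.ofList [(s, q.2)])).contains x.1))
          = rest.filter (fun x => !acc.contains x.1) := by
        apply List.filter_congr
        intro x hx
        have hne : (x.1 == q.1) = false :=
          beq_eq_false_iff_ne.mpr (fun hEq => hq1 (hEq ▸ List.mem_map_of_mem hx))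
        rw [PySem.Dict.contains_insert, hne, Bool.false_or]
      rw [hmap, hfil, List.filter_cons_of_pos (by simp [hF]), List.map_cons]
      rw [List.append_assoc, List.singleton_append]

lemma trD_spec :
    ∀ (data : List (String × List (String × Int))), Pre_sort_skus data →
    data.foldl (fun acc p =>
      p.2.foldl (fun acc q =>
        if acc.contains q.1 then
          acc.modify q.1 PySem.Dict.empty (fun inner => inner.insert p.1 q.2)
        else
          acc.insert q.1 (PySem.Dict.ofList [(p.1, q.2)])) acc) PySem.Dict.empty
    = trD data := by
  intro data
  induction data using List.reverseRecOn with
  | nil => intro _; rfl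
  | append_singleton ds p ih =>
    intro hpre
    obtain ⟨hnd, hinner⟩ := hpre
    rw [List.map_append] at hnd
    have hndds : (ds.map Prod.fst).Nodup := (List.nodup_append.mp hnd).1
    have hfreshs : p.1 ∉ ds.map Prod.fst := by
      intro hm
      have h2 := (List.nodup_append.mp hnd).2.2 p.1 hm
      simp at h2
    have hpl : (p.2.map Prod.fst).Nodup := hinner p (by simp)
    rw [List.foldl_append, ih ⟨hndds, fun r hr => hinner r (List.mem_append_left _ hr)⟩,
      List.foldl_cons, List.foldl_nil]
    have hkeys : (trD ds).keys.Nodup := by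
      rw [trD_keys]; exact PySem.Set.nodup_ofList _
    have hfresh : ∀ q ∈ p.2, ∀ inner, (trD ds).get? q.1 = some inner →
        inner.contains p.1 = false := by
      intro q _ inner hget
      simp only [trD, PySem.Dict.get?, Option.map_eq_some_iff] at hget
      obtain ⟨⟨k, d⟩, hfind, hd⟩ := hget
      have hmem := List.mem_of_find?_eq_some hfind
      obtain ⟨sku, _, hEq⟩ := List.mem_map.mp hmem
      have hdval : d = PySem.Dict.mk (colA ds sku) := (congrArg Prod.snd hEq).symm
      subst hd hdval
      simp only [PySem.Dict.contains, List.any_eq_false]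
      intro e he
      simp only [colA, List.mem_map, List.mem_filter] at he
      obtain ⟨r, ⟨hrds, _⟩, hre⟩ := he
      intro hbeq
      exact hfreshs (eq_of_beq hbeq ▸ hre ▸ List.mem_map_of_mem (f := Prod.fst) hrds)
    rw [inner_fold_items p.1 p.2 (trD ds) hpl hkeys hfresh]
    -- now the items-level equality
    conv_rhs => rw [trD]
    rw [List.flatMap_append, List.flatMap_singleton, PySem.Set.ofList_append,
      PySem.Set.update_eq_append_filter, List.map_append]
    apply PySem.Dict.ext
    show _ ++ _ = _ ++ _
    congr 1
    · -- updated old entries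
      conv_lhs => rw [trD]
      show ((PySem.Set.ofList (ds.flatMap (fun r => r.2.map (fun q => q.1)))).map
        (fun sku => (sku, PySem.Dict.mk (colA ds sku)))).map _ = _
      rw [List.map_map]
      apply List.map_congr_left
      intro sku _
      simp only [Function.comp_apply]
      by_cases hc : (PySem.Dict.mk p.2).contains sku = true
      · rw [if_pos hc]
        refine Prod.ext rfl ?_
        apply PySem.Dict.ext
        show colA ds sku ++ _ = colA (ds ++ [p]) sku
        rw [colA_append_singleton, if_pos hc]
      · rw [if_neg hc]
        refine Prod.ext rfl ?_
        apply PySem.Dict.ext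
        show colA ds sku = colA (ds ++ [p]) sku
        rw [colA_append_singleton, if_neg hc, List.append_nil]
    · -- new entries
      rw [PySem.Set.ofList_eq_self_of_nodup _ hpl, List.filter_map, List.map_map]
      have hcs : ∀ y : String, (trD ds).contains y
          = PySem.Set.contains (PySem.Set.ofList (ds.flatMap (fun r => r.2.map (fun q => q.1)))) y := by
        intro y
        rw [PySem.Dict.contains_eq_decide_mem_keys, trD_keys]
        simp [PySem.Set.contains_eq_listContains]
      have hfil : (p.2.filter (fun q => !(trD ds).contains q.1))
          = p.2.filter ((fun y => !(PySem.Set.ofList (ds.flatMap (fun r => r.2.map (fun q => q.1)))).contains y) ∘ Prod.fst) := by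
        apply List.filter_congr
        intro x _
        simp only [Function.comp_apply, hcs]
      rw [hfil]
      apply List.map_congr_left
      intro q hq
      rw [List.mem_filter] at hq
      obtain ⟨hqp, hnew⟩ := hq
      have hnmem : q.1 ∉ ds.flatMap (fun r => r.2.map (fun q => q.1)) := by
        intro hm
        simp only [Function.comp_apply, Bool.not_eq_eq_eq_not, Bool.not_true,
          PySem.Set.contains_eq_listContains, List.contains_eq_mem,
          decide_eq_false_iff_not] at hnew
        exact hnew ((PySem.Set.mem_ofList _ _).mpr hm)
      simp only [Function.comp_apply]
      refine Prod.ext rfl ?_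
      apply PySem.Dict.ext
      show [(p.1, q.2)] = colA (ds ++ [p]) q.1
      rw [colA_append_singleton, colA_eq_nil ds q.1 hnmem, List.nil_append]
      have hcq : (PySem.Dict.mk p.2).contains q.1 = true := by
        simp only [PySem.Dict.contains, List.any_eq_true]
        exact ⟨q, hqp, by simp⟩
      rw [if_pos hcq]
      have : (PySem.Dict.mk p.2).get? q.1 = some q.2 :=
        PySem.Dict.get?_of_mem_items _ hqp hpl
      rw [this]
      rfl

-- ===== VERDICT (by name: the statement is the Claim_ definition above) =====
theorem sort_skus_spec : Claim_equal_sort_skus := by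
  intro data _ hpre
  unfold Spec_sort_skus sort_skus sort_skus_alt
  rw [trD_spec data hpre]
  simp [trD, colA, PySem.List.dedup, List.map_map, Function.comp]
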